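-- pv_equiv track=rewrite | github.com/Lauriy/facebook-hacker-cup-submissions | 2021/a1.py | max_minor_total_count
-- ===== SOURCE A (Python) =====
-- from collections import Counter, namedtuple
--
-- CountingResults = namedtuple('CountingResults', 'max minor total')
--
-- def max_minor_total_count(counter: Counter) -> CountingResults:
--     total_count = 0
--     max_count = 0
--     for symbol, count in counter.items():
--         if count > max_count:
--             max_count = count
--         total_count += count
--
--     return CountingResults(max_count, total_count - max_count, total_count)
-- ===== SOURCE B (Python) =====
-- from collections import Counter, namedtuple
--
-- CountingResults = namedtuple('CountingResults', 'max minor total')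
--
-- def max_minor_total_count(counter: Counter) -> CountingResults:
--     # Sort-then-pick: sort the counts (seeded with the original's 0 floor);
--     # the largest count is then the last element of the sorted list.
--     ordered = sorted([0, *counter.values()])
--     total_count = sum(ordered)  # the extra 0 does not change the sum
--     max_count = ordered[-1]
--     return CountingResults(max_count, total_count - max_count, total_count)
-- ===== Notes on version B (the rewrite author's own statement) =====
-- stated objective: alternative
-- what changed: Replaces A's one-pass accumulator loop by a sort-then-pick strategy: sort the values seeded with 0, read the maximum off the end of the sorted list, and take the total as the sum of the sorted list.
import Mathlib
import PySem

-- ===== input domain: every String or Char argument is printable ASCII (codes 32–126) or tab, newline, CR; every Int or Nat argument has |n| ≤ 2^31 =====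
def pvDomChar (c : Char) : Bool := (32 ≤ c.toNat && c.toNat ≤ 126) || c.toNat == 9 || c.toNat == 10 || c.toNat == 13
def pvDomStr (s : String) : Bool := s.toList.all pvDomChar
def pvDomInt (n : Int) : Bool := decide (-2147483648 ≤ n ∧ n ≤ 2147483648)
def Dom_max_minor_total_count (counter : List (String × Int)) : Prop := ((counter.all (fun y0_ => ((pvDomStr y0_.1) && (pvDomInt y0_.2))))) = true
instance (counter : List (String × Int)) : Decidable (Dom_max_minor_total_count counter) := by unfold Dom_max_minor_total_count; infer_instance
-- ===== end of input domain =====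

-- ===== PORT A =====
-- B replaces A's one-pass accumulator loop by sort-then-pick-last; return value only.
def max_minor_total_count (counter : List (String × Int)) : Int × Int × Int :=
  let st := counter.foldl
    (fun (s : Int × Int) p =>
      (s.1 + p.2, if p.2 > s.2 then p.2 else s.2)) (0, 0)
  (st.2, st.1 - st.2, st.1)

-- ===== PORT B =====
def max_minor_total_count_alt (counter : List (String × Int)) : Int × Int × Int :=
  let ordered := PySem.List.sorted (0 :: counter.map Prod.snd) (fun x => x) false
  let total_count := ordered.sum
  -- ordered[-1]; ordered is nonempty (it contains the seed 0), so the default is never taken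
  let max_count := (PySem.List.pyGet? ordered (-1)).getD 0
  (max_count, total_count - max_count, total_count)

-- ===== PRECONDITION & SPEC =====
def Spec_max_minor_total_count (counter : List (String × Int)) (out : Int × Int × Int) : Prop := out = max_minor_total_count_alt counter
instance (counter : List (String × Int)) (out : Int × Int × Int) : Decidable (Spec_max_minor_total_count counter out) := by unfold Spec_max_minor_total_count; infer_instance

-- ===== CLAIM (what is proved, stated in full; the proofs are below) =====
def Claim_equal_max_minor_total_count : Prop := ∀ (counter : List (String × Int)), Dom_max_minor_total_count counter → Spec_max_minor_total_count counter (max_minor_total_count counter)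

-- ===== LEMMAS AND PROOFS =====

-- A's fold computes (running sum, running max seeded with 0) of the values.
theorem fold_char (l : List (String × Int)) : ∀ (t m : Int),
    l.foldl (fun (s : Int × Int) p => (s.1 + p.2, if p.2 > s.2 then p.2 else s.2)) (t, m)
      = (t + (l.map Prod.snd).sum, (l.map Prod.snd).foldl max m) := by
  induction l with
  | nil => intro t m; simp
  | cons h tl ih =>
      intro t m
      simp only [List.foldl_cons, List.map_cons, List.sum_cons, ih]
      have h1 : t + h.2 + (List.map Prod.snd tl).sum = t + (h.2 + (List.map Prod.snd tl).sum) := by ring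
      have h2 : (if h.2 > m then h.2 else m) = max m h.2 := by
        by_cases hc : h.2 > m <;> simp [hc, max_def] <;> omega
      rw [h1, h2]

-- foldl max is an upper bound of the seed and every element …
theorem foldl_max_ub (l : List Int) : ∀ (a : Int), a ≤ l.foldl max a ∧ ∀ x ∈ l, x ≤ l.foldl max a := by
  induction l with
  | nil => intro a; simp
  | cons h tl ih =>
      intro a
      obtain ⟨hseed, hmem⟩ := ih (max a h)
      refine ⟨le_trans (le_max_left a h) hseed, ?_⟩
      intro x hx
      rcases List.mem_cons.mp hx with rfl | hx
      · exact le_trans (le_max_right a x) hseed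
      · exact hmem x hx

-- … and is itself the seed or an element.
theorem foldl_max_mem (l : List Int) : ∀ (a : Int), l.foldl max a = a ∨ l.foldl max a ∈ l := by
  induction l with
  | nil => intro a; simp
  | cons h tl ih =>
      intro a
      rcases ih (max a h) with heq | hmem
      · rw [List.foldl_cons, heq]
        rcases max_choice a h with h1 | h1 <;> simp [h1]
      · right; exact List.mem_cons_of_mem _ hmem

-- the last element of a ≤-sorted list bounds every element
theorem getLast_ub (l : List Int) (hp : l.Pairwise (· ≤ ·)) (h : l ≠ []) :
    ∀ x ∈ l, x ≤ l.getLast h := by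
  induction l with
  | nil => simp at h
  | cons a tl ih =>
      intro x hx
      rcases List.mem_cons.mp hx with rfl | hx
      · cases tl with
        | nil => simp [List.getLast]
        | cons b tb =>
            have : x ≤ b := (List.pairwise_cons.mp hp).1 b (List.mem_cons_self)
            have hb : b ≤ (b :: tb).getLast (by simp) :=
              ih (List.pairwise_cons.mp hp).2 (by simp) b List.mem_cons_self
            calc x ≤ b := this
              _ ≤ _ := hb
              _ = (x :: b :: tb).getLast h := (List.getLast_cons (by simp)).symm
      · cases tl with
        | nil => simp at hx
        | cons b tb =>
            have := ih (List.pairwise_cons.mp hp).2 (by simp) x hx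
            rw [List.getLast_cons (by simp)]
            exact this

-- ===== VERDICT (by name: the statement is the Claim_ definition above) =====
theorem max_minor_total_count_spec : Claim_equal_max_minor_total_count := by
  intro counter _
  unfold Spec_max_minor_total_count max_minor_total_count max_minor_total_count_alt
  simp only [fold_char]
  set vals := counter.map Prod.snd with hvals
  set ordered := PySem.List.sorted (0 :: vals) (fun x => x) false with hord
  have hperm : ordered.Perm (0 :: vals) := PySem.List.sorted_perm _ _ _
  have hne : ordered ≠ [] := by
    intro h0
    have := hperm.length_eq
    rw [h0] at this; simp at this
  have hpw : ordered.Pairwise (· ≤ ·) := by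
    have := PySem.List.sorted_pairwise (xs := 0 :: vals) (key := fun x => x)
    simpa using this
  -- the two maxima coincide
  have hmax : ordered.getLast hne = vals.foldl max 0 := by
    have hub := getLast_ub ordered hpw hne
    have hmem : ordered.getLast hne ∈ (0 :: vals) := hperm.mem_iff.mp (List.getLast_mem hne)
    have hfub := foldl_max_ub vals 0
    -- getLast ≤ foldl max 0
    have h1 : ordered.getLast hne ≤ vals.foldl max 0 := by
      rcases List.mem_cons.mp hmem with heq | hmem'
      · rw [heq]; exact hfub.1
      · exact hfub.2 _ hmem'
    -- foldl max 0 ≤ getLast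
    have h2 : vals.foldl max 0 ≤ ordered.getLast hne := by
      rcases foldl_max_mem vals 0 with heq | hmem'
      · rw [heq]
        exact hub 0 (hperm.mem_iff.mpr (List.mem_cons_self))
      · exact hub _ (hperm.mem_iff.mpr (List.mem_cons_of_mem _ hmem'))
    omega
  have hsum : ordered.sum = vals.sum := by
    have := hperm.sum_eq
    simpa using this
  have hget : PySem.List.pyGet? ordered (-1) = some (ordered.getLast hne) := by
    rw [PySem.List.pyGet?_neg_one, List.getLast?_eq_some_getLast hne]
  simp only [hget, Option.getD_some, hsum, hmax, zero_add]
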